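-- pv_equiv track=rewrite | github.com/teru1991/CraftCAD | scripts/ci/parse_failures.py | recommend_priority
-- ===== SOURCE A (Python) =====
-- def recommend_priority(failure_categories: set[str]) -> str:
--     if any(cat in failure_categories for cat in {"rust_compile_error"}):
--         return "fmt"
--     if "clippy" in failure_categories:
--         return "clippy"
--     if "rust_test_fail" in failure_categories:
--         return "test"
--     if "link_error" in failure_categories:
--         return "link"
--     if any(cat in failure_categories for cat in {"cmake_error", "qt_meta_object", "ctest_fail"}):
--         return "desktop"
--     return "none"
-- ===== SOURCE B (Python) =====
-- # Lowest-rank-wins: map each category to a numeric severity rank, take the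
-- # minimum rank over the input in one pass, and index a label table with it.
-- _RANK = {
--     "rust_compile_error": 0,
--     "clippy": 1,
--     "rust_test_fail": 2,
--     "link_error": 3,
--     "cmake_error": 4,
--     "qt_meta_object": 4,
--     "ctest_fail": 4,
-- }
-- _LABELS = ["fmt", "clippy", "test", "link", "desktop", "none"]
--
--
-- def recommend_priority(failure_categories: set[str]) -> str:
--     best = 5
--     for cat in failure_categories:
--         best = min(best, _RANK.get(cat, 5))
--     return _LABELS[best]
-- ===== Notes on version B (the rewrite author's own statement) =====
-- stated objective: alternative
-- what changed: Instead of testing the rule conditions in priority order, B folds once over the input categories computing the minimum numeric rank from a dict and indexes a label table with it (lowest rank wins).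
import Mathlib
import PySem

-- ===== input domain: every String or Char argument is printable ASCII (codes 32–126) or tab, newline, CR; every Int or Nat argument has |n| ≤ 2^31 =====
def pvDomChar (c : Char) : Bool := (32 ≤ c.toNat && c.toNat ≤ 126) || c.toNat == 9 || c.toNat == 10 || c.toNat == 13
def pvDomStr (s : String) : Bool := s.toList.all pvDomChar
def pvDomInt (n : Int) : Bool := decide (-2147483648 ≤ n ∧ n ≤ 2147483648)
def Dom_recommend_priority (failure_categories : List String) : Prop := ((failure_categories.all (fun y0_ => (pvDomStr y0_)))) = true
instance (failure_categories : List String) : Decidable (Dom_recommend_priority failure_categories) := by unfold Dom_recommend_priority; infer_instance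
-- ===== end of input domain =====

-- B replaces A's ordered if-cascade by a single fold computing the minimum numeric rank
-- of the input categories (dict lookup), then indexes a label table (objective: alternative).


-- ===== PORT A =====
-- literal transliteration of A's if-cascade; 'x in set' = membership in the distinct-element list
def recommend_priority (failure_categories : List String) : String :=
  if ["rust_compile_error"].any (fun cat => failure_categories.contains cat) then "fmt"
  else if failure_categories.contains "clippy" then "clippy"
  else if failure_categories.contains "rust_test_fail" then "test"
  else if failure_categories.contains "link_error" then "link"
  else if ["cmake_error", "qt_meta_object", "ctest_fail"].any (fun cat => failure_categories.contains cat) then "desktop"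
  else "none"

-- ===== PORT B =====
-- the _RANK dict of Source B
def pvRank : PySem.Dict String Int :=
  PySem.Dict.ofList
    [("rust_compile_error", 0), ("clippy", 1), ("rust_test_fail", 2), ("link_error", 3),
     ("cmake_error", 4), ("qt_meta_object", 4), ("ctest_fail", 4)]

-- the _LABELS table of Source B
def pvLabels : List String := ["fmt", "clippy", "test", "link", "desktop", "none"]

-- Source B: fold min(best, _RANK.get(cat, 5)) over the input, then _LABELS[best];
-- the final best always lies in 0..5, so the pyGet? index is in range and the
-- .getD "" default is never taken (exact on every input).
def recommend_priority_alt (failure_categories : List String) : String :=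
  let best := failure_categories.foldl (fun best cat => min best (PySem.Dict.getD pvRank cat 5)) 5
  (PySem.List.pyGet? pvLabels best).getD ""

-- ===== PRECONDITION & SPEC =====
def Spec_recommend_priority (failure_categories : List String) (out : String) : Prop := out = recommend_priority_alt failure_categories
instance (failure_categories : List String) (out : String) : Decidable (Spec_recommend_priority failure_categories out) := by unfold Spec_recommend_priority; infer_instance

-- ===== CLAIM (what is proved, stated in full; the proofs are below) =====
def Claim_equal_recommend_priority : Prop := ∀ (failure_categories : List String), Dom_recommend_priority failure_categories → Spec_recommend_priority failure_categories (recommend_priority failure_categories)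

-- ===== LEMMAS AND PROOFS =====
-- the rank of a single category (abbreviation for the dict lookup in B's fold)
def pvR (c : String) : Int := PySem.Dict.getD pvRank c 5

-- the minimum rank present in l, written as A's nested membership cascade
def pvMinRank (l : List String) : Int :=
  if "rust_compile_error" ∈ l then 0
  else if "clippy" ∈ l then 1
  else if "rust_test_fail" ∈ l then 2
  else if "link_error" ∈ l then 3
  else if "cmake_error" ∈ l ∨ "qt_meta_object" ∈ l ∨ "ctest_fail" ∈ l then 4
  else 5

theorem pvR_cases (c : String) :
    (c = "rust_compile_error" ∧ pvR c = 0) ∨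
    (c = "clippy" ∧ pvR c = 1) ∨
    (c = "rust_test_fail" ∧ pvR c = 2) ∨
    (c = "link_error" ∧ pvR c = 3) ∨
    ((c = "cmake_error" ∨ c = "qt_meta_object" ∨ c = "ctest_fail") ∧ pvR c = 4) ∨
    (c ≠ "rust_compile_error" ∧ c ≠ "clippy" ∧ c ≠ "rust_test_fail" ∧ c ≠ "link_error" ∧
      c ≠ "cmake_error" ∧ c ≠ "qt_meta_object" ∧ c ≠ "ctest_fail" ∧ pvR c = 5) := by
  have hmk : pvRank = PySem.Dict.mk
      [("rust_compile_error", 0), ("clippy", 1), ("rust_test_fail", 2), ("link_error", 3),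
       ("cmake_error", 4), ("qt_meta_object", 4), ("ctest_fail", 4)] := by decide
  by_cases h1 : c = "rust_compile_error"
  · exact Or.inl ⟨h1, by subst h1; decide⟩
  by_cases h2 : c = "clippy"
  · exact Or.inr (Or.inl ⟨h2, by subst h2; decide⟩)
  by_cases h3 : c = "rust_test_fail"
  · exact Or.inr (Or.inr (Or.inl ⟨h3, by subst h3; decide⟩))
  by_cases h4 : c = "link_error"
  · exact Or.inr (Or.inr (Or.inr (Or.inl ⟨h4, by subst h4; decide⟩)))
  by_cases h5 : c = "cmake_error"
  · exact Or.inr (Or.inr (Or.inr (Or.inr (Or.inl ⟨Or.inl h5, by subst h5; decide⟩))))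
  by_cases h6 : c = "qt_meta_object"
  · exact Or.inr (Or.inr (Or.inr (Or.inr (Or.inl ⟨Or.inr (Or.inl h6), by subst h6; decide⟩))))
  by_cases h7 : c = "ctest_fail"
  · exact Or.inr (Or.inr (Or.inr (Or.inr (Or.inl ⟨Or.inr (Or.inr h7), by subst h7; decide⟩))))
  refine Or.inr (Or.inr (Or.inr (Or.inr (Or.inr ⟨h1, h2, h3, h4, h5, h6, h7, ?_⟩))))
  simp [pvR, PySem.Dict.getD, hmk, beq_iff_eq,
    Ne.symm h1, Ne.symm h2, Ne.symm h3, Ne.symm h4, Ne.symm h5, Ne.symm h6, Ne.symm h7,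
    PySem.Dict.get?]

theorem pvMinRank_cons (c : String) (rest : List String) :
    pvMinRank (c :: rest) = min (pvR c) (pvMinRank rest) := by
  rcases pvR_cases c with ⟨he, hr⟩ | ⟨he, hr⟩ | ⟨he, hr⟩ | ⟨he, hr⟩ | ⟨he, hr⟩ |
    ⟨h1, h2, h3, h4, h5, h6, h7, hr⟩
  · subst he; simp only [pvMinRank, List.mem_cons, hr]
    simp; split_ifs <;> omega
  · subst he; simp only [pvMinRank, List.mem_cons, hr]
    simp; split_ifs <;> omega
  · subst he; simp only [pvMinRank, List.mem_cons, hr]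
    simp; split_ifs <;> omega
  · subst he; simp only [pvMinRank, List.mem_cons, hr]
    simp; split_ifs <;> omega
  · rcases he with he | he | he <;>
    · subst he; simp only [pvMinRank, List.mem_cons, hr]
      simp; split_ifs <;> omega
  · simp only [pvMinRank, List.mem_cons, hr]
    simp [Ne.symm h1, Ne.symm h2, Ne.symm h3, Ne.symm h4, Ne.symm h5, Ne.symm h6, Ne.symm h7]
    split_ifs <;> omega

theorem fold_min_eq (l : List String) : ∀ b : Int, b ≤ 5 →
    l.foldl (fun best cat => min best (PySem.Dict.getD pvRank cat 5)) b = min b (pvMinRank l) := by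
  induction l with
  | nil => intro b hb; simp [pvMinRank]; omega
  | cons c rest ih =>
      intro b hb
      simp only [List.foldl_cons]
      have hle : min b (PySem.Dict.getD pvRank c 5) ≤ 5 := le_trans (min_le_left _ _) hb
      rw [ih _ hle, pvMinRank_cons]
      show min b (pvR c) ⊓ pvMinRank rest = _
      omega

theorem pvMinRank_bounds (l : List String) : 0 ≤ pvMinRank l ∧ pvMinRank l ≤ 5 := by
  unfold pvMinRank; split_ifs <;> omega

-- ===== VERDICT (by name: the statement is the Claim_ definition above) =====
set_option maxHeartbeats 1000000 in
theorem recommend_priority_spec : Claim_equal_recommend_priority := by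
  intro l _
  unfold Spec_recommend_priority recommend_priority recommend_priority_alt
  rw [fold_min_eq l 5 (by omega)]
  have hb := pvMinRank_bounds l
  have hmin : min (5 : Int) (pvMinRank l) = pvMinRank l := by omega
  rw [hmin]
  unfold pvMinRank
  by_cases h1 : "rust_compile_error" ∈ l <;>
  by_cases h2 : "clippy" ∈ l <;>
  by_cases h3 : "rust_test_fail" ∈ l <;>
  by_cases h4 : "link_error" ∈ l <;>
  by_cases h5 : "cmake_error" ∈ l <;>
  by_cases h6 : "qt_meta_object" ∈ l <;>
  by_cases h7 : "ctest_fail" ∈ l <;>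
  simp only [h1, h2, h3, h4, h5, h6, h7, List.contains_eq_mem, List.any_cons, List.any_nil,
    decide_true, decide_false, Bool.or_false, or_true, or_false, or_self,
    if_true, if_false] <;> decide
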